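-- pv_equiv track=rewrite | github.com/sancho-mgn/clear_code | 6.2_3.py | Keymaker
-- ===== SOURCE A (Python) =====
-- def Keymaker(number_keys):
--     list_of_keys = [0 for _ in range(number_keys)]
--     for i in range(number_keys):
--         for j in range(number_keys):
--             if j % (i + 1) == i:
--                     if list_of_keys[j] == 0:
--                         list_of_keys[j] = 1
--                     else:
--                         list_of_keys[j] = 0
--     return ''.join(str(i) for i in list_of_keys)
-- ===== SOURCE B (Python) =====
-- def Keymaker(number_keys):
--     # Bit j ends up 1 iff j+1 has an odd number of divisors, i.e. iff j+1 is a
--     # perfect square: set exactly those positions directly.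
--     bits = ['0'] * number_keys
--     k = 1
--     while k * k <= number_keys:
--         bits[k * k - 1] = '1'
--         k += 1
--     return ''.join(bits)
-- ===== Notes on version B (the rewrite author's own statement) =====
-- stated objective: faster
-- what changed: Instead of the O(n^2) nested toggle loops, B marks positions k*k-1 directly while stepping k through the squares up to n, since bit j is toggled once per divisor of j+1 and ends 1 exactly when j+1 is a perfect square.
import Mathlib
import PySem

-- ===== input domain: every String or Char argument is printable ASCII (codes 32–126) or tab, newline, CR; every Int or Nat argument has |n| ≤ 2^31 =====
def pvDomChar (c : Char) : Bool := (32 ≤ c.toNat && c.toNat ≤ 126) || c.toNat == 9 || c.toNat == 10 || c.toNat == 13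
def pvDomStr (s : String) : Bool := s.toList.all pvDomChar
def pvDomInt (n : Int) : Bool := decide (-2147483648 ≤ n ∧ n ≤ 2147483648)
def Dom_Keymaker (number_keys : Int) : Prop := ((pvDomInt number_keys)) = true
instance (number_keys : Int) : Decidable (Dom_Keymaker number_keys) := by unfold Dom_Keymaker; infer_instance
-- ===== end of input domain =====

-- B replaces A's O(n^2) nested toggle loops by directly marking the perfect-square
-- positions k*k-1 while k*k ≤ n (bit j ends 1 iff j+1 has an odd divisor count,
-- i.e. iff j+1 is a perfect square).

-- ===== PORT A =====
def Keymaker (number_keys : Int) : String :=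
  let list_of_keys : List Int := (PySem.List.pyRange 0 number_keys 1).map (fun _ => 0)
  let list_of_keys :=
    (PySem.List.pyRange 0 number_keys 1).foldl (fun lst i =>
      (PySem.List.pyRange 0 number_keys 1).foldl (fun l j =>
        if PySem.Int.mod j (i + 1) = i then
          if PySem.List.pyGetD l j 0 = 0 then PySem.List.pySetD l j 1
          else PySem.List.pySetD l j 0
        else l) lst) list_of_keys
  PySem.Str.join "" (list_of_keys.map (fun i => PySem.Int.toStr i))

-- ===== PORT B =====
-- while k * k <= number_keys: bits[k*k-1] = '1'; k += 1
def kmLoop (n k : Nat) (bits : List Char) : List Char :=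
  if k * k ≤ n then kmLoop n (k + 1) (bits.set (k * k - 1) '1') else bits
termination_by n + 1 - k
decreasing_by
  rcases Nat.eq_zero_or_pos k with rfl | hk
  · omega
  · have := Nat.le_mul_of_pos_left k hk; omega

def Keymaker_alt (number_keys : Int) : String :=
  String.ofList (kmLoop number_keys.toNat 1 (List.replicate number_keys.toNat '0'))

-- ===== PRECONDITION & SPEC =====
def Spec_Keymaker (number_keys : Int) (out : String) : Prop := out = Keymaker_alt number_keys
instance (number_keys : Int) (out : String) : Decidable (Spec_Keymaker number_keys out) := by unfold Spec_Keymaker; infer_instance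

-- ===== CLAIM (what is proved, stated in full; the proofs are below) =====
def Claim_equal_Keymaker : Prop := ∀ (number_keys : Int), Dom_Keymaker number_keys → Spec_Keymaker number_keys (Keymaker number_keys)

-- ===== LEMMAS AND PROOFS =====

/-- One toggle of A's 0/1 cell. -/
def pvTog (v : Int) : Int := if v = 0 then 1 else 0

lemma pvTog_iterate_zero (c : Nat) : pvTog^[c] 0 = if Odd c then 1 else 0 := by
  induction c with
  | zero => simp
  | succ c ih =>
      rw [Function.iterate_succ_apply', ih]
      rcases Nat.even_or_odd c with h | h <;>
        simp [pvTog, Nat.odd_add_one, h, Nat.not_odd_iff_even]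

/-- Pointwise effect of A's inner loop over a nodup list of in-range indices. -/
lemma inner_foldl (i : Int) : ∀ (idxs : List Int) (lst : List Int), idxs.Nodup →
    (∀ x ∈ idxs, 0 ≤ x ∧ x.toNat < lst.length) →
    ((idxs.foldl (fun l j =>
        if PySem.Int.mod j (i + 1) = i then
          if PySem.List.pyGetD l j 0 = 0 then PySem.List.pySetD l j 1
          else PySem.List.pySetD l j 0
        else l) lst).length = lst.length ∧
      ∀ (j : Nat),
        (idxs.foldl (fun l j =>
          if PySem.Int.mod j (i + 1) = i then
            if PySem.List.pyGetD l j 0 = 0 then PySem.List.pySetD l j 1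
            else PySem.List.pySetD l j 0
          else l) lst)[j]? =
        if (j : Int) ∈ idxs ∧ PySem.Int.mod (j : Int) (i + 1) = i
        then lst[j]?.map pvTog else lst[j]?) := by
  intro idxs
  induction idxs with
  | nil => intro lst _ _; simp
  | cons x rest ih =>
      intro lst hnd hin
      have hx := hin x (List.mem_cons_self)
      have hxlen : x.toNat < lst.length := hx.2
      have hx0 : (0 : Int) ≤ x := hx.1
      -- the list after processing index x
      set lst' := (if PySem.Int.mod x (i + 1) = i then
          if PySem.List.pyGetD lst x 0 = 0 then PySem.List.pySetD lst x 1
          else PySem.List.pySetD lst x 0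
        else lst) with hlst'
      have hset : ∀ v : Int, PySem.List.pySetD lst x v = lst.set x.toNat v := fun v =>
        PySem.List.pySetD_of_nonneg lst v hx0
      have hget : PySem.List.pyGetD lst x 0 = lst[x.toNat] := by
        exact PySem.List.pyGetD_eq_getElem lst 0 hx0 (by omega)
      have hlen' : lst'.length = lst.length := by
        rw [hlst']; split <;> [skip; rfl]; split <;> simp [hset]
      have hsame : ∀ j : Nat, j ≠ x.toNat → lst'[j]? = lst[j]? := by
        intro j hj
        rw [hlst']; split <;> [skip; rfl]; split <;>
          simp [hset, List.getElem?_set_ne (Ne.symm hj)]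
      have hat : lst'[x.toNat]? =
          if PySem.Int.mod x (i + 1) = i then some (pvTog lst[x.toNat]) else lst[x.toNat]? := by
        rw [hlst']
        split
        · split <;> rename_i h0 <;>
            simp [hset, List.getElem?_set_self hxlen, pvTog, hget.symm, h0]
        · rfl
      have hrest := ih lst' (List.nodup_cons.mp hnd).2
        (fun y hy => by have := hin y (List.mem_cons_of_mem _ hy); omega)
      refine ⟨by rw [List.foldl_cons, ← hlst', hrest.1, hlen'], ?_⟩
      intro j
      rw [List.foldl_cons, ← hlst', hrest.2 j]
      by_cases hjx : j = x.toNat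
      · subst hjx
        have hjx' : ((x.toNat : Nat) : Int) = x := by omega
        have hjnr : ((x.toNat : Nat) : Int) ∉ rest := by
          rw [hjx']; exact (List.nodup_cons.mp hnd).1
        rw [if_neg (by tauto), hat, hjx']
        by_cases hc : PySem.Int.mod x (i + 1) = i
        · rw [if_pos hc, if_pos ⟨List.mem_cons_self, hc⟩,
            List.getElem?_eq_getElem hxlen, Option.map_some]
        · rw [if_neg hc, if_neg (by rw [List.mem_cons]; tauto)]
      · have hjx' : (j : Int) ≠ x := by omega
        rw [hsame j hjx]; simp only [List.mem_cons]
        by_cases hm : (j : Int) ∈ rest ∧ PySem.Int.mod (j : Int) (i + 1) = i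
        · rw [if_pos hm, if_pos ⟨Or.inr hm.1, hm.2⟩]
        · rw [if_neg hm, if_neg (by tauto)]

/-- Pointwise effect of A's outer loop: each cell is toggled once per matching i. -/
lemma outer_foldl (N : Int) : ∀ (is : List Int) (lst : List Int), lst.length = N.toNat →
    ((is.foldl (fun lst i =>
        (PySem.List.pyRange 0 N 1).foldl (fun l j =>
          if PySem.Int.mod j (i + 1) = i then
            if PySem.List.pyGetD l j 0 = 0 then PySem.List.pySetD l j 1
            else PySem.List.pySetD l j 0
          else l) lst) lst).length = N.toNat ∧
      ∀ (j : Nat), j < N.toNat →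
        (is.foldl (fun lst i =>
          (PySem.List.pyRange 0 N 1).foldl (fun l j =>
            if PySem.Int.mod j (i + 1) = i then
              if PySem.List.pyGetD l j 0 = 0 then PySem.List.pySetD l j 1
              else PySem.List.pySetD l j 0
            else l) lst) lst)[j]? =
        lst[j]?.map (pvTog^[is.countP (fun i => decide (PySem.Int.mod (j : Int) (i + 1) = i))])) := by
  intro is
  induction is with
  | nil => intro lst hlen; exact ⟨hlen, fun j _ => by simp⟩
  | cons i rest ih =>
      intro lst hlen
      have hinner := inner_foldl i (PySem.List.pyRange 0 N 1) lst
        (PySem.List.nodup_pyRange_one 0 N)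
        (fun x hx => by
          rw [PySem.List.mem_pyRange_one] at hx
          constructor
          · exact hx.1
          · omega)
      set lst' := (PySem.List.pyRange 0 N 1).foldl (fun l j =>
          if PySem.Int.mod j (i + 1) = i then
            if PySem.List.pyGetD l j 0 = 0 then PySem.List.pySetD l j 1
            else PySem.List.pySetD l j 0
          else l) lst with hlst'
      have hrest := ih lst' (by rw [hinner.1, hlen])
      refine ⟨by rw [List.foldl_cons, ← hlst', hrest.1], ?_⟩
      intro j hj
      rw [List.foldl_cons, ← hlst', hrest.2 j hj, hinner.2 j]
      have hjmem : (j : Int) ∈ PySem.List.pyRange 0 N 1 := by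
        rw [PySem.List.mem_pyRange_one]; omega
      rw [List.countP_cons]
      by_cases hc : PySem.Int.mod (j : Int) (i + 1) = i
      · rw [if_pos ⟨hjmem, hc⟩]
        simp only [hc, decide_true, if_true, Option.map_map]
        rw [← Function.iterate_succ pvTog]
      · rw [if_neg (fun h => hc h.2)]
        simp [hc]

lemma mod_eq_iff_dvd (i j : Nat) :
    PySem.Int.mod (j : Int) ((i : Int) + 1) = (i : Int) ↔ (i + 1) ∣ (j + 1) := by
  have hcast : ((i : Int) + 1) = ((i + 1 : Nat) : Int) := by push_cast; ring
  rw [hcast, PySem.Int.mod_natCast, Nat.cast_inj]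
  constructor
  · intro h
    refine ⟨j / (i + 1) + 1, ?_⟩
    have h1 := Nat.div_add_mod j (i + 1)
    have h2 : (i + 1) * (j / (i + 1) + 1) = (i + 1) * (j / (i + 1)) + (i + 1) :=
      Nat.mul_succ _ _
    omega
  · rintro ⟨c, hc⟩
    have hc1 : 1 ≤ c := by nlinarith
    have hj : j = i + (i + 1) * (c - 1) := by
      have : (i + 1) * c = (i + 1) * (c - 1) + (i + 1) := by
        rw [Nat.mul_sub_one]
        have : i + 1 ≤ (i + 1) * c := Nat.le_mul_of_pos_right _ hc1
        omega
      omega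
    rw [hj, Nat.add_mul_mod_self_left]
    exact Nat.mod_eq_of_lt (by omega)

lemma countP_range_eq_card_filter (p : Nat → Prop) [DecidablePred p] (n : Nat) :
    (List.range n).countP (fun k => decide (p k)) = ((Finset.range n).filter p).card := by
  induction n with
  | zero => rfl
  | succ n ih =>
      rw [List.range_succ, Finset.range_add_one, List.countP_append, Finset.filter_insert]
      by_cases h : p n
      · rw [if_pos h, Finset.card_insert_of_notMem (by simp)]
        simp [h, ih]
      · rw [if_neg h]; simp [h, ih]

lemma countP_range_divisors (n j : Nat) (hj : j < n) :
    (List.range n).countP (fun k => decide ((k + 1) ∣ (j + 1))) = (j + 1).divisors.card := by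
  rw [countP_range_eq_card_filter (fun k => (k + 1) ∣ (j + 1)) n]
  refine Finset.card_bij' (fun k _ => k + 1) (fun d _ => d - 1) ?_ ?_ ?_ ?_
  · intro k hk
    rw [Finset.mem_filter, Finset.mem_range] at hk
    exact Nat.mem_divisors.mpr ⟨hk.2, by omega⟩
  · intro d hd
    rw [Nat.mem_divisors] at hd
    have hd1 : 1 ≤ d := Nat.pos_of_dvd_of_pos hd.1 (by omega)
    have hdle : d ≤ j + 1 := Nat.le_of_dvd (by omega) hd.1
    rw [Finset.mem_filter, Finset.mem_range]
    refine ⟨by show d - 1 < n; omega, ?_⟩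
    show d - 1 + 1 ∣ j + 1
    have : d - 1 + 1 = d := by omega
    rw [this]; exact hd.1
  · intro k _; show k + 1 - 1 = k; omega
  · intro d hd
    rw [Nat.mem_divisors] at hd
    have hd1 : 1 ≤ d := Nat.pos_of_dvd_of_pos hd.1 (by omega)
    show d - 1 + 1 = d
    omega

lemma odd_card_divisors_iff (m : Nat) (hm : 0 < m) :
    Odd m.divisors.card ↔ ∃ r, r * r = m := by
  have hm0 : m ≠ 0 := by omega
  set S := m.divisors with hS
  -- split the divisors by comparing d*d with m
  have hsplit : S.card = (S.filter (fun d => d * d < m)).card +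
      (S.filter (fun d => ¬ d * d < m)).card :=
    (Finset.card_filter_add_card_filter_not (s := S) _).symm
  have hsplit2 : (S.filter (fun d => ¬ d * d < m)).card =
      (S.filter (fun d => d * d = m)).card + (S.filter (fun d => m < d * d)).card := by
    have e1 : S.filter (fun d => d * d = m) =
        (S.filter (fun d => ¬ d * d < m)).filter (fun d => d * d = m) := by
      rw [Finset.filter_filter]
      exact Finset.filter_congr (fun d _ => by constructor <;> (intro h; omega))
    have e2 : S.filter (fun d => m < d * d) =
        (S.filter (fun d => ¬ d * d < m)).filter (fun d => ¬ d * d = m) := by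
      rw [Finset.filter_filter]
      exact Finset.filter_congr (fun d _ => by constructor <;> (intro h; omega))
    rw [e1, e2, Finset.card_filter_add_card_filter_not]
  -- the strict halves pair up via d ↦ m / d
  have hdivmem : ∀ d ∈ S, 0 < d ∧ d ∣ m := fun d hd =>
    ⟨Nat.pos_of_mem_divisors hd, (Nat.mem_divisors.mp hd).1⟩
  have hLG : (S.filter (fun d => d * d < m)).card =
      (S.filter (fun d => m < d * d)).card := by
    refine Finset.card_bij' (fun d _ => m / d) (fun d _ => m / d) ?_ ?_ ?_ ?_
    · intro d hd
      rw [Finset.mem_filter] at hd ⊢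
      obtain ⟨hdpos, hdvd⟩ := hdivmem d hd.1
      have hdm : d * (m / d) = m := Nat.mul_div_cancel' hdvd
      have hdq : d < m / d := by
        by_contra hle
        rw [Nat.not_lt] at hle
        have : d * (m / d) ≤ d * d := Nat.mul_le_mul_left d hle
        omega
      refine ⟨Nat.mem_divisors.mpr ⟨⟨d, (Nat.div_mul_cancel hdvd).symm⟩, hm0⟩, ?_⟩
      calc m = d * (m / d) := hdm.symm
        _ < (m / d) * (m / d) := (Nat.mul_lt_mul_right (by omega)).mpr hdq
    · intro d hd
      rw [Finset.mem_filter] at hd ⊢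
      obtain ⟨hdpos, hdvd⟩ := hdivmem d hd.1
      have hdm : d * (m / d) = m := Nat.mul_div_cancel' hdvd
      have hqpos : 0 < m / d :=
        Nat.div_pos (Nat.le_of_dvd (by omega) hdvd) hdpos
      have hdq : m / d < d := by
        by_contra hle
        rw [Nat.not_lt] at hle
        have : d * d ≤ d * (m / d) := Nat.mul_le_mul_left d hle
        omega
      refine ⟨Nat.mem_divisors.mpr ⟨⟨d, (Nat.div_mul_cancel hdvd).symm⟩, hm0⟩, ?_⟩
      calc m / d * (m / d) < d * (m / d) := (Nat.mul_lt_mul_right hqpos).mpr hdq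
        _ = m := hdm
    · intro d hd
      rw [Finset.mem_filter] at hd
      exact Nat.div_div_self (hdivmem d hd.1).2 hm0
    · intro d hd
      rw [Finset.mem_filter] at hd
      exact Nat.div_div_self (hdivmem d hd.1).2 hm0
  -- the middle part has a single element iff m is a square
  by_cases hsq : ∃ r, r * r = m
  · obtain ⟨r, hr⟩ := hsq
    have hE : S.filter (fun d => d * d = m) = {r} := by
      apply Finset.eq_singleton_iff_unique_mem.mpr
      refine ⟨Finset.mem_filter.mpr ⟨Nat.mem_divisors.mpr ⟨⟨r, hr.symm⟩, hm0⟩, hr⟩, ?_⟩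
      intro d hd
      rw [Finset.mem_filter] at hd
      exact Nat.mul_self_inj.mp (by rw [hd.2, hr])
    rw [hE] at hsplit2
    simp only [Finset.card_singleton] at hsplit2
    constructor
    · intro _; exact ⟨r, hr⟩
    · intro _; rw [hsplit, hsplit2, ← hLG, Nat.odd_iff]; omega
  · have hE : S.filter (fun d => d * d = m) = ∅ := by
      apply Finset.filter_eq_empty_iff.mpr
      intro d _ hd
      exact hsq ⟨d, hd⟩
    rw [hE] at hsplit2
    simp only [Finset.card_empty] at hsplit2
    constructor
    · intro hodd
      exfalso
      rw [hsplit, hsplit2, ← hLG, Nat.odd_iff] at hodd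
      omega
    · intro h; exact absurd h hsq

lemma kmLoop_length : ∀ (n k : Nat) (bits : List Char), (kmLoop n k bits).length = bits.length := by
  intro n k bits
  fun_induction kmLoop n k bits with
  | case1 k bits h ih => rw [ih, List.length_set]
  | case2 => rfl

lemma kmLoop_keep : ∀ (n k : Nat) (bits : List Char), 1 ≤ k →
    ∀ j : Nat, (∀ t, k ≤ t → t * t ≠ j + 1) → (kmLoop n k bits)[j]? = bits[j]? := by
  intro n k bits
  fun_induction kmLoop n k bits with
  | case1 k bits h ih =>
      intro hk j hnone
      rw [ih (by omega) j (fun t ht => hnone t (by omega))]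
      have h1 : 1 * 1 ≤ k * k := Nat.mul_le_mul hk hk
      exact List.getElem?_set_ne (by have := hnone k (Nat.le_refl k); omega)
  | case2 => intro _ _ _; rfl

lemma kmLoop_one : ∀ (n k : Nat) (bits : List Char), bits.length = n → 1 ≤ k →
    ∀ j : Nat, j < n → (∃ t, k ≤ t ∧ t * t = j + 1) → (kmLoop n k bits)[j]? = some '1' := by
  intro n k bits
  fun_induction kmLoop n k bits with
  | case1 k bits h ih =>
      intro hlen hk j hj hex
      by_cases h2 : ∃ t, k + 1 ≤ t ∧ t * t = j + 1
      · exact ih (by rw [List.length_set]; exact hlen) (by omega) j hj h2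
      · have hjk : k * k = j + 1 := by
          obtain ⟨t, ht, htt⟩ := hex
          rcases Nat.eq_or_lt_of_le ht with rfl | hlt
          · exact htt
          · exact absurd ⟨t, by omega, htt⟩ h2
        rw [kmLoop_keep n (k + 1) _ (by omega) j
          (fun t ht htt => h2 ⟨t, ht, htt⟩)]
        have hj' : j = k * k - 1 := by omega
        rw [← hj']
        exact List.getElem?_set_self (by omega)
  | case2 k bits h =>
      intro hlen hk j hj hex
      obtain ⟨t, ht, htt⟩ := hex
      have : k * k ≤ t * t := Nat.mul_le_mul ht ht
      omega

-- ===== VERDICT (by name: the statement is the Claim_ definition above) =====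
theorem Keymaker_spec : Claim_equal_Keymaker := by
  intro N _
  unfold Spec_Keymaker
  simp only [Keymaker, Keymaker_alt]
  set n := N.toNat with hn
  have hinitlen : ((PySem.List.pyRange 0 N 1).map (fun _ => (0 : Int))).length = n := by
    rw [List.length_map, PySem.List.length_pyRange_one]; omega
  have houter := outer_foldl N (PySem.List.pyRange 0 N 1)
    ((PySem.List.pyRange 0 N 1).map (fun _ => (0 : Int))) hinitlen
  set G := (PySem.List.pyRange 0 N 1).foldl (fun lst i =>
      (PySem.List.pyRange 0 N 1).foldl (fun l j =>
        if PySem.Int.mod j (i + 1) = i then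
          if PySem.List.pyGetD l j 0 = 0 then PySem.List.pySetD l j 1
          else PySem.List.pySetD l j 0
        else l) lst) ((PySem.List.pyRange 0 N 1).map (fun _ => (0 : Int))) with hG
  set BL := kmLoop n 1 (List.replicate n '0') with hBL
  have hBLlen : BL.length = n := by rw [hBL, kmLoop_length, List.length_replicate]
  refine String.ext ?_
  rw [PySem.Str.toList_join, String.toList_ofList, List.map_map]
  have hmapeq : G.map (String.toList ∘ fun i => PySem.Int.toStr i) =
      BL.map (fun c => [c]) := by
    apply List.ext_getElem?
    intro j
    rw [List.getElem?_map, List.getElem?_map]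
    by_cases hj : j < n
    · have hjlen : j < (PySem.List.pyRange 0 N 1).length := by
        rw [PySem.List.length_pyRange_one]; omega
      have hinit : ((PySem.List.pyRange 0 N 1).map (fun _ => (0 : Int)))[j]? = some 0 := by
        rw [List.getElem?_map, List.getElem?_eq_getElem hjlen, Option.map_some]
      have hcount : (PySem.List.pyRange 0 N 1).countP
          (fun i => decide (PySem.Int.mod (j : Int) (i + 1) = i)) = (j + 1).divisors.card := by
        rw [PySem.List.pyRange_one, List.countP_map,
          show ((N : Int) - 0).toNat = n from by omega]
        rw [List.countP_congr (fun k _ => ?_), countP_range_divisors n j hj]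
        simp only [Function.comp_apply, zero_add, decide_eq_true_eq]
        exact mod_eq_iff_dvd k j
      have hGj : G[j]? = some (pvTog^[(j + 1).divisors.card] 0) := by
        rw [hG, houter.2 j hj, hinit, Option.map_some, hcount]
      by_cases hsq : ∃ r, r * r = j + 1
      · have hodd : Odd (j + 1).divisors.card :=
          (odd_card_divisors_iff (j + 1) (by omega)).mpr hsq
        have hBLj : BL[j]? = some '1' := by
          obtain ⟨r, hr⟩ := hsq
          exact kmLoop_one n 1 (List.replicate n '0') (List.length_replicate)
            (Nat.le_refl 1) j hj ⟨r, by rcases Nat.eq_zero_or_pos r with rfl | h <;> omega, hr⟩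
        rw [hGj, hBLj, pvTog_iterate_zero, if_pos hodd]
        rfl
      · have heven : ¬ Odd (j + 1).divisors.card := fun h =>
          hsq ((odd_card_divisors_iff (j + 1) (by omega)).mp h)
        have hBLj : BL[j]? = some '0' := by
          rw [hBL, kmLoop_keep n 1 (List.replicate n '0') (Nat.le_refl 1) j
            (fun t _ htt => hsq ⟨t, htt⟩)]
          rw [List.getElem?_eq_getElem (by rw [List.length_replicate]; omega),
            List.getElem_replicate]
        rw [hGj, hBLj, pvTog_iterate_zero, if_neg heven]
        rfl
    · rw [List.getElem?_eq_none (by rw [hG, houter.1]; omega),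
        List.getElem?_eq_none (by omega), Option.map_none, Option.map_none]
  rw [hmapeq, PySem.Chars.join_nil_singletons, String.toList_ofList]
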